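-- pv_equiv track=rewrite | github.com/vindruid/ocr_indonesia | modelOCR.py | rule_O
-- ===== SOURCE A (Python) =====
-- def rule_O(text):
--     consonant = 'bcdfghjklmnpqrstvwxyz'.upper()
--     consonant = [c for c in consonant]
--     new_text = []
--     for i, t in enumerate(text):
--         if t == "Q":
--             if (i != 0) & (i != len(text)-1):
--                 if (text[i-1] in consonant) & (text[i+1] in consonant):
--                     t = "O"
--         new_text.append(t)
--
--     return "".join(new_text)
-- ===== SOURCE B (Python) =====
-- def rule_O(text):
--     # Run-based: split the text into maximal runs of consonants (Q is a
--     # consonant); a Q becomes O exactly when it is interior to such a run.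
--     cons = frozenset("BCDFGHJKLMNPQRSTVWXYZ")
--
--     def fix(run):
--         if len(run) < 3:
--             return run
--         return run[:1] + "".join("O" if c == "Q" else c for c in run[1:-1]) + run[-1:]
--
--     pieces = []
--     run = ""
--     for ch in text:
--         if ch in cons:
--             run += ch
--         else:
--             pieces.append(fix(run))
--             pieces.append(ch)
--             run = ""
--     pieces.append(fix(run))
--     return "".join(pieces)
-- ===== Notes on version B (the rewrite author's own statement) =====
-- stated objective: alternative
-- what changed: Instead of A's per-index neighbor checks, B splits the text into maximal runs of consonants (Q counts as a consonant) and rewrites each run in isolation, replacing Q only at interior positions of the run; no neighbor indexing or boundary tests remain.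
import Mathlib
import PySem

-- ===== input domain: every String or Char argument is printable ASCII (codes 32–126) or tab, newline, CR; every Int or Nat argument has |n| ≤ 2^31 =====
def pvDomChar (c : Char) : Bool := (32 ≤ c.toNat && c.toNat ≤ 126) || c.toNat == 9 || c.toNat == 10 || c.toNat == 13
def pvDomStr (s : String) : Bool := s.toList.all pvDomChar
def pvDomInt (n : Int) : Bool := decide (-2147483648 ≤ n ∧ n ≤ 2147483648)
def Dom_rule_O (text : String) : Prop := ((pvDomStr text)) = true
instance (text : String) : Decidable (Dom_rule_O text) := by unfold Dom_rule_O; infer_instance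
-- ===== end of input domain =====

-- B splits the text into maximal consonant runs and rewrites each run's interior Qs, instead of A's per-index neighbor checks (alternative algorithm; return value only).

-- ===== PORT A =====
def rule_O (text : String) : String :=
  let consonant := PySem.Chars.upper "bcdfghjklmnpqrstvwxyz".toList
  let newText := (PySem.List.enumerate text.toList).foldl (fun acc it =>
    let i := it.1
    let t := it.2
    let t := if t = 'Q' then
        if i ≠ 0 ∧ i ≠ PySem.List.len text.toList - 1 then
          if PySem.List.pyGetD text.toList (i - 1) ' ' ∈ consonant ∧
             PySem.List.pyGetD text.toList (i + 1) ' ' ∈ consonant then 'O' else t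
        else t
      else t
    acc ++ [t]) []
  String.mk newText

-- ===== PORT B =====
-- fix(run): run[:1] + "".join("O" if c == "Q" else c for c in run[1:-1]) + run[-1:]
def rule_O_fix (run : List Char) : List Char :=
  if run.length < 3 then run
  else PySem.List.slice run none (some 1)
       ++ (PySem.List.slice run (some 1) (some (-1))).map (fun c => if c = 'Q' then 'O' else c)
       ++ PySem.List.slice run (some (-1)) none

-- the body of B's for-loop over the characters
def rule_O_step (cons : PySem.Set Char) (st : List (List Char) × List Char) (ch : Char) :
    List (List Char) × List Char :=
  if PySem.Set.contains cons ch then (st.1, st.2 ++ [ch])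
  else (st.1 ++ [rule_O_fix st.2, [ch]], [])

def rule_O_alt (text : String) : String :=
  let cons := PySem.Set.ofList "BCDFGHJKLMNPQRSTVWXYZ".toList
  let st := text.toList.foldl (rule_O_step cons) ([], [])
  String.mk (st.1 ++ [rule_O_fix st.2]).flatten

-- ===== PRECONDITION & SPEC =====
def Spec_rule_O (text : String) (out : String) : Prop := out = rule_O_alt text
instance (text : String) (out : String) : Decidable (Spec_rule_O text out) := by unfold Spec_rule_O; infer_instance

-- ===== CLAIM (what is proved, stated in full; the proofs are below) =====
def Claim_equal_rule_O : Prop := ∀ (text : String), Dom_rule_O text → Spec_rule_O text (rule_O text)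

-- ===== LEMMAS AND PROOFS =====

def pvConsL : List Char := "BCDFGHJKLMNPQRSTVWXYZ".toList

def pvRepl (c : Char) : Char := if c = 'Q' then 'O' else c

-- pointwise form of A's decision (triple (prev, cur, next))
def pvFz (pcn : (Char × Char) × Char) : Char :=
  if pcn.1.2 = 'Q' ∧ pcn.1.1 ∈ pvConsL ∧ pcn.2 ∈ pvConsL then 'O' else pcn.1.2

-- "next char is a consonant" on the remaining suffix
def pvNb (l : List Char) : Bool :=
  match l with
  | [] => false
  | d :: _ => decide (d ∈ pvConsL)

-- recursive pointwise spec: p = "previous char is a consonant"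
def pvPw : Bool → List Char → List Char
  | _, [] => []
  | p, c :: rest =>
      (if c = 'Q' ∧ p = true ∧ pvNb rest = true then 'O' else c) :: pvPw (decide (c ∈ pvConsL)) rest

-- run rewriting with explicit left-boundary flag p
def pvG : Bool → List Char → List Char
  | _, [] => []
  | p, c :: run' => (if c = 'Q' ∧ p = true ∧ run' ≠ [] then 'O' else c) :: pvG true run'

set_option maxHeartbeats 800000 in
lemma pointwise (cs : List Char) (k : Nat) (hk : k < cs.length)
    (h0 : k < (' '::cs).length) (h2 : k < (List.drop 1 cs ++ [' ']).length) :
    (if cs[k] = 'Q' then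
      if 0 + (k:Int) ≠ 0 ∧ 0 + (k:Int) ≠ PySem.List.len cs - 1 then
        if PySem.List.pyGetD cs (0 + (k:Int) - 1) ' ' ∈ PySem.Chars.upper "bcdfghjklmnpqrstvwxyz".toList ∧
            PySem.List.pyGetD cs (0 + (k:Int) + 1) ' ' ∈ PySem.Chars.upper "bcdfghjklmnpqrstvwxyz".toList then
          'O'
        else cs[k]
      else cs[k]
    else cs[k]) =
    if cs[k] = 'Q' ∧ (' ' :: cs)[k] ∈ pvConsL ∧ (List.drop 1 cs ++ [' '])[k] ∈ pvConsL then
      'O'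
    else cs[k] := by
  have hup : PySem.Chars.upper "bcdfghjklmnpqrstvwxyz".toList = pvConsL := by decide
  rw [hup]
  simp only [PySem.List.len_eq]
  have hsp : ' ' ∉ pvConsL := by decide
  match k with
  | 0 =>
    have hgi : ¬(0 + ((0:Nat):Int) ≠ 0 ∧ 0 + ((0:Nat):Int) ≠ (cs.length:Int) - 1) := by
      intro h; exact h.1 (by norm_num)
    rw [List.getElem_cons_zero, if_neg hgi, ite_self, if_neg (fun h => hsp h.2.1)]
  | (j+1) =>
    rw [List.getElem_cons_succ]
    by_cases hlast : j + 1 = cs.length - 1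
    · have hidx : (List.drop 1 cs ++ [' '])[j+1] = ' ' := by
        have hlen : (List.drop 1 cs).length = j + 1 := by simp; omega
        rw [List.getElem_append_right (by omega)]
        simp only [List.getElem_singleton]
      have hgi : ¬ (0 + ((j+1:Nat):Int) ≠ 0 ∧ 0 + ((j+1:Nat):Int) ≠ (cs.length:Int) - 1) := by
        push_cast; omega
      rw [hidx, if_neg hgi, ite_self, if_neg (fun h => hsp h.2.2)]
    · have hq2 : j + 2 < cs.length := by omega
      have hprev : PySem.List.pyGetD cs (0 + ((j+1:Nat):Int) - 1) ' ' = cs[j] := by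
        have : (0 + ((j+1:Nat):Int) - 1) = ((j:Nat):Int) := by push_cast; omega
        rw [this, PySem.List.pyGetD_natCast, List.getD_eq_getElem _ _ (by omega)]
      have hnexta : PySem.List.pyGetD cs (0 + ((j+1:Nat):Int) + 1) ' ' = cs[j+2] := by
        have : (0 + ((j+1:Nat):Int) + 1) = ((j+2:Nat):Int) := by push_cast; omega
        rw [this, PySem.List.pyGetD_natCast, List.getD_eq_getElem _ _ hq2]
      have hnextb : (List.drop 1 cs ++ [' '])[j+1] = cs[j+2] := by
        rw [List.getElem_append_left (by simp; omega), List.getElem_drop]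
        have h12 : 1 + (j+1) = j + 2 := by omega
        simp [h12]
      have hgi : (0 + ((j+1:Nat):Int) ≠ 0 ∧ 0 + ((j+1:Nat):Int) ≠ (cs.length:Int) - 1) := by
        constructor <;> (push_cast; omega)
      rw [hprev, hnexta, hnextb, if_pos hgi]
      by_cases hQ : cs[j+1] = 'Q'
      · by_cases hm : cs[j] ∈ pvConsL ∧ cs[j+2] ∈ pvConsL
        · rw [if_pos hQ, if_pos hm, if_pos ⟨hQ, hm⟩]
        · rw [if_pos hQ, if_neg hm, if_neg (fun h => hm h.2)]
      · rw [if_neg hQ, if_neg (fun h => hQ h.1)]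

-- A equals the zip-of-shifted-copies pointwise map
lemma A_eq_zm (text : String) :
    rule_O text =
      String.mk (((((' ' :: text.toList).zip text.toList).zip
        (text.toList.drop 1 ++ [' '])).map pvFz)) := by
  simp only [rule_O, PySem.List.foldl_append_singleton_eq_map, List.nil_append]
  congr 1
  apply List.ext_getElem
  · simp [PySem.List.length_enumerate]; omega
  · intro k h1 h2
    simp only [List.getElem_map, PySem.List.getElem_enumerate, List.getElem_zip]
    have hk : k < text.toList.length := by
      simpa [PySem.List.length_enumerate] using h1
    exact pointwise text.toList k hk (by simp only [List.length_cons]; omega)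
      (by simp only [List.length_append, List.length_drop, List.length_cons, List.length_nil]; omega)

-- the zip map equals the recursive pointwise spec
lemma zm_eq_pw : ∀ (cs : List Char) (prev : Char),
    ((((prev :: cs).zip cs).zip (cs.drop 1 ++ [' '])).map pvFz) =
      pvPw (decide (prev ∈ pvConsL)) cs := by
  intro cs
  induction cs with
  | nil => intro prev; rfl
  | cons c cs' ih =>
    intro prev
    cases cs' with
    | nil =>
      show [pvFz ((prev, c), ' ')] = pvPw (decide (prev ∈ pvConsL)) [c]
      have h1 : pvFz ((prev, c), ' ') = c := by
        rw [pvFz]; exact if_neg (fun h => (by decide : ¬ ' ' ∈ pvConsL) h.2.2)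
      have h2 : pvPw (decide (prev ∈ pvConsL)) [c] = [c] := by
        show (if c = 'Q' ∧ decide (prev ∈ pvConsL) = true ∧ pvNb [] = true then 'O' else c) :: [] = [c]
        rw [if_neg (by simp [pvNb])]
      rw [h1, h2]
    | cons d cs'' =>
      have htl := ih c
      simp only [List.zip_cons_cons, List.drop_succ_cons, List.drop_zero, List.cons_append,
        List.map_cons] at htl ⊢
      rw [htl]
      show pvFz ((prev, c), d) :: pvPw (decide (c ∈ pvConsL)) (d :: cs'') =
        (if c = 'Q' ∧ decide (prev ∈ pvConsL) = true ∧ pvNb (d :: cs'') = true then 'O' else c)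
          :: pvPw (decide (c ∈ pvConsL)) (d :: cs'')
      congr 1
      rw [pvFz]
      exact if_congr (by simp [pvNb]) rfl rfl

-- A's result is the recursive pointwise spec started at the left boundary
lemma A_eq_pw (text : String) : rule_O text = String.mk (pvPw false text.toList) := by
  rw [A_eq_zm, zm_eq_pw]
  congr 1

-- run[1:-1] computed (used to unfold Source B's fix)
lemma slice_one_negone (xs : List Char) :
    PySem.List.slice xs (some 1) (some (-1)) = (xs.drop 1).dropLast := by
  rcases xs with _ | ⟨x, xs⟩ <;> simp [PySem.List.slice, List.dropLast_eq_take]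

-- interior rewriting of a nonempty run (everything but the last char gets pvRepl)
lemma g_true_concat : ∀ (run' : List Char) (z : Char),
    pvG true (run' ++ [z]) = run'.map pvRepl ++ [z] := by
  intro run'
  induction run' with
  | nil => intro z; simp [pvG]
  | cons c run'' ih =>
    intro z
    simp only [List.cons_append, pvG, List.map_cons, ih]
    congr 1
    simp [pvRepl]

-- pvG false equals Source B's fix (unconditionally)
lemma g_eq_fix : ∀ (run : List Char), pvG false run = rule_O_fix run := by
  intro run
  match run with
  | [] => simp [pvG, rule_O_fix]
  | [a] => simp [pvG, rule_O_fix]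
  | [a, b] => simp [pvG, rule_O_fix]
  | a :: b :: c :: rest =>
    have hne : (b :: c :: rest) ≠ [] := by simp
    have hsplit : (b :: c :: rest).dropLast ++ [(b :: c :: rest).getLast hne] = b :: c :: rest :=
      List.dropLast_append_getLast hne
    have hfix : rule_O_fix (a :: b :: c :: rest) =
        [a] ++ ((b :: c :: rest).dropLast).map pvRepl ++ [(b :: c :: rest).getLast hne] := by
      rw [rule_O_fix, if_neg (by simp)]
      have hrepl : (fun c => if c = 'Q' then 'O' else c) = pvRepl := funext fun c => rfl
      rw [hrepl]
      have h1 : PySem.List.slice (a :: b :: c :: rest) none (some 1) = [a] := by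
        rw [show ((1:Int)) = ((1:Nat):Int) from rfl, PySem.List.slice_to_natCast]; rfl
      have h2 : PySem.List.slice (a :: b :: c :: rest) (some 1) (some (-1)) =
          ((a :: b :: c :: rest).drop 1).dropLast := slice_one_negone _
      have h3 : PySem.List.slice (a :: b :: c :: rest) (some (-1)) none =
          [(b :: c :: rest).getLast hne] := by
        rw [PySem.List.slice_from_neg_one]
        conv_lhs => rw [show (a :: b :: c :: rest) = (a :: (b :: c :: rest).dropLast) ++ [(b :: c :: rest).getLast hne] by rw [List.cons_append, hsplit]]
        rw [show ((a :: (b :: c :: rest).dropLast) ++ [(b :: c :: rest).getLast hne]).length - 1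
              = (a :: (b :: c :: rest).dropLast).length by simp]
        rw [List.drop_left]
      rw [h1, h2, h3]
      simp [pvRepl]
    calc pvG false (a :: b :: c :: rest)
        = a :: pvG true (b :: c :: rest) := by
          show (if a = 'Q' ∧ false = true ∧ (b :: c :: rest) ≠ [] then 'O' else a)
            :: pvG true (b :: c :: rest) = _
          rw [if_neg (by simp)]
      _ = a :: pvG true ((b :: c :: rest).dropLast ++ [(b :: c :: rest).getLast hne]) := by
          rw [hsplit]
      _ = a :: ((b :: c :: rest).dropLast.map pvRepl ++ [(b :: c :: rest).getLast hne]) := by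
          rw [g_true_concat]
      _ = rule_O_fix (a :: b :: c :: rest) := by rw [hfix]; rfl

-- rewriting a consonant run followed by a non-consonant (or empty) suffix splits off
lemma pw_split : ∀ (run : List Char) (p : Bool) (tail : List Char),
    (∀ c ∈ run, c ∈ pvConsL) → pvNb tail = false →
    pvPw p (run ++ tail) = pvG p run ++ pvPw false tail := by
  intro run
  induction run with
  | nil =>
    intro p tail _ htail
    cases tail with
    | nil => rfl
    | cons d rest =>
      have hd : ¬ d ∈ pvConsL := by simpa [pvNb] using htail
      have hdq : d ≠ 'Q' := fun h => hd (h ▸ (by decide : 'Q' ∈ pvConsL))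
      simp only [pvG, List.nil_append, pvPw]
      rw [if_neg (fun h => hdq h.1), if_neg (fun h => hdq h.1)]
  | cons c run' ih =>
    intro p tail hall htail
    have hc : c ∈ pvConsL := hall c (by simp)
    have hall' : ∀ x ∈ run', x ∈ pvConsL := fun x hx => hall x (by simp [hx])
    simp only [List.cons_append, pvPw, pvG]
    rw [decide_eq_true hc, ih true tail hall' htail]
    congr 1
    cases run' with
    | nil =>
      rw [List.nil_append, htail]
      simp
    | cons r run'' =>
      have hr : r ∈ pvConsL := hall' r (by simp)
      have hnb : pvNb ((r :: run'') ++ tail) = true := by simp [pvNb, hr]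
      rw [hnb]
      simp

-- loop invariant for B's fold: the flushed pieces plus the pending run realize pvPw
lemma b_inv : ∀ (rest : List Char) (pieces : List (List Char)) (run : List Char),
    (∀ c ∈ run, c ∈ pvConsL) →
    (let r := rest.foldl (rule_O_step (PySem.Set.ofList "BCDFGHJKLMNPQRSTVWXYZ".toList)) (pieces, run)
     (r.1 ++ [rule_O_fix r.2]).flatten) = pieces.flatten ++ pvPw false (run ++ rest) := by
  intro rest
  induction rest with
  | nil =>
    intro pieces run hall
    simp only [List.foldl_nil, List.flatten_append, List.flatten_cons, List.flatten_nil,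
      List.append_nil]
    have h := pw_split run false [] hall rfl
    simp only [List.append_nil, pvPw] at h
    rw [h, ← g_eq_fix]
  | cons ch rest' ih =>
    intro pieces run hall
    simp only [List.foldl_cons]
    by_cases hch : ch ∈ pvConsL
    · have hcont : PySem.Set.contains (PySem.Set.ofList "BCDFGHJKLMNPQRSTVWXYZ".toList) ch = true := by
        rw [PySem.Set.contains_iff]
        have hof : (PySem.Set.ofList "BCDFGHJKLMNPQRSTVWXYZ".toList : List Char) =
            "BCDFGHJKLMNPQRSTVWXYZ".toList := by decide
        rw [hof]; exact hch
      have hall2 : ∀ x ∈ run ++ [ch], x ∈ pvConsL := by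
        intro x hx
        rcases List.mem_append.mp hx with h | h
        · exact hall x h
        · simp at h; exact h ▸ hch
      rw [show rule_O_step (PySem.Set.ofList "BCDFGHJKLMNPQRSTVWXYZ".toList) (pieces, run) ch
            = (pieces, run ++ [ch]) by rw [rule_O_step, if_pos hcont]]
      rw [ih pieces (run ++ [ch]) hall2, List.append_assoc]
      rfl
    · have hcont : ¬ PySem.Set.contains (PySem.Set.ofList "BCDFGHJKLMNPQRSTVWXYZ".toList) ch = true := by
        rw [PySem.Set.contains_iff]
        have hof : (PySem.Set.ofList "BCDFGHJKLMNPQRSTVWXYZ".toList : List Char) =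
            "BCDFGHJKLMNPQRSTVWXYZ".toList := by decide
        rw [hof]; exact hch
      rw [show rule_O_step (PySem.Set.ofList "BCDFGHJKLMNPQRSTVWXYZ".toList) (pieces, run) ch
            = (pieces ++ [rule_O_fix run, [ch]], []) by rw [rule_O_step, if_neg hcont]]
      rw [ih (pieces ++ [rule_O_fix run, [ch]]) [] (by intro x hx; simp at hx)]
      have hpwc : pvPw false (ch :: rest') = ch :: pvPw false rest' := by
        show (if ch = 'Q' ∧ false = true ∧ pvNb rest' = true then 'O' else ch)
          :: pvPw (decide (ch ∈ pvConsL)) rest' = _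
        rw [if_neg (by simp), decide_eq_false hch]
      rw [pw_split run false (ch :: rest') hall (by simp [pvNb, hch]), hpwc, ← g_eq_fix]
      simp [List.flatten_append, List.append_assoc]

lemma B_eq_pw (text : String) : rule_O_alt text = String.mk (pvPw false text.toList) := by
  simp only [rule_O_alt]
  congr 1
  have := b_inv text.toList [] [] (by intro x hx; simp at hx)
  simpa using this

-- ===== VERDICT (by name: the statement is the Claim_ definition above) =====
theorem rule_O_spec : Claim_equal_rule_O := by
  intro text _
  unfold Spec_rule_O
  rw [A_eq_pw, B_eq_pw]
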